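-- pv_equiv track=rewrite | github.com/dougy83/jlcparts | jlcparts/datatables.py | normalizeCapitalization
-- ===== SOURCE A (Python) =====
-- def normalizeCapitalization(key):
--     """
--     Given a category name, normalize capitalization. We turn everything
--     lowercase, but some known substring (such as MOQ or MHz) replace back to the
--     correct capitalization
--     """
--     key = key.lower()
--     CAPITALIZATIONS = [
--         "Basic/Extended", "MHz", "GHz", "Hz", "MOQ"
--     ]
--     for capt in CAPITALIZATIONS:
--         key = key.replace(capt.lower(), capt)
--     key = key[0].upper() + key[1:]
--     return key
-- ===== SOURCE B (Python) =====
-- _SUBS = [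
--     ("basic/extended", "Basic/Extended"),
--     ("mhz", "MHz"),
--     ("ghz", "GHz"),
--     ("hz", "Hz"),
--     ("moq", "MOQ"),
-- ]
--
-- def normalizeCapitalization(key):
--     """Single left-to-right pass: at each position try the known substrings in
--     priority order and emit their fixed capitalization, instead of five
--     sequential full-string replace passes."""
--     s = key.lower()
--     out = []
--     i = 0
--     n = len(s)
--     while i < n:
--         for pat, rep in _SUBS:
--             if s.startswith(pat, i):
--                 out.append(rep)
--                 i += len(pat)
--                 break
--         else:
--             out.append(s[i])
--             i += 1
--     res = "".join(out)
--     return res[0].upper() + res[1:]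
-- ===== Notes on version B (the rewrite author's own statement) =====
-- stated objective: alternative
-- what changed: Replaces five sequential full-string .replace passes by a single left-to-right scan that, at each position, tries the known substrings in priority order and emits their fixed capitalization.
import Mathlib
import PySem

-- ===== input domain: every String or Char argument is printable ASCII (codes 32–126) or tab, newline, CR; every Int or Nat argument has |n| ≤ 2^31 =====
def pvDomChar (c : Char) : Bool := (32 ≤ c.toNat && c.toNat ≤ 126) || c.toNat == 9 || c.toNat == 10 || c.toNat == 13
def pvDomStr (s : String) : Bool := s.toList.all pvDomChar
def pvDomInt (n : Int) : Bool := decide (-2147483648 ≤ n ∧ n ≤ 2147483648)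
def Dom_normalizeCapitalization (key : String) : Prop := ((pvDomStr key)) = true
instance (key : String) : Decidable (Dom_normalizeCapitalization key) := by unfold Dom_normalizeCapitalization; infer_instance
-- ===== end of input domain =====

-- B replaces A's five sequential full-string .replace passes by one left-to-right scan
-- trying the known substrings in priority order at each position (objective: alternative).

-- ===== PORT A =====
-- the CAPITALIZATIONS list of A
def pvCaps : List (List Char) :=
  ["Basic/Extended".toList, "MHz".toList, "GHz".toList, "Hz".toList, "MOQ".toList]

def normalizeCapitalization (key : String) : String :=
  -- key = key.lower()
  let k0 := PySem.Chars.lower key.toList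
  -- for capt in CAPITALIZATIONS: key = key.replace(capt.lower(), capt)
  let k1 := pvCaps.foldl (fun s capt => PySem.Chars.replace s (PySem.Chars.lower capt) capt) k0
  -- key = key[0].upper() + key[1:]   (key[0] raises IndexError on the empty string: outside Pre_)
  match k1 with
  | [] => ""
  | c :: rest => String.ofList (PySem.Chars.upper [c] ++ rest)

-- ===== PORT B =====
-- the while-loop of B: at each position try the substrings of _SUBS in order (the elif chain),
-- emit the fixed capitalization and skip the match, else copy one character
def pvScan (l : List Char) : List Char :=
  match l with
  | [] => []
  | c :: t =>
    if "basic/extended".toList <+: (c :: t) then "Basic/Extended".toList ++ pvScan (t.drop 13)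
    else if "mhz".toList <+: (c :: t) then "MHz".toList ++ pvScan (t.drop 2)
    else if "ghz".toList <+: (c :: t) then "GHz".toList ++ pvScan (t.drop 2)
    else if "hz".toList <+: (c :: t) then "Hz".toList ++ pvScan (t.drop 1)
    else if "moq".toList <+: (c :: t) then "MOQ".toList ++ pvScan (t.drop 2)
    else c :: pvScan t
termination_by l.length
decreasing_by all_goals (simp only [List.length_cons, List.length_drop]; omega)

def normalizeCapitalization_alt (key : String) : String :=
  -- s = key.lower(); the scan builds res; return res[0].upper() + res[1:]  (res[0] raises on "")
  let res := pvScan (PySem.Chars.lower key.toList)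
  match res with
  | [] => ""
  | c :: rest => String.ofList (PySem.Chars.upper [c] ++ rest)

-- ===== PRECONDITION & SPEC =====
-- Pre_ excludes only the empty string, on which Python A (and B) raises IndexError at key[0].
def Pre_normalizeCapitalization (key : String) : Prop := key ≠ ""
instance (key : String) : Decidable (Pre_normalizeCapitalization key) := by
  unfold Pre_normalizeCapitalization; infer_instance
def pvWitness_normalizeCapitalization : String := "basic/extended 100mhz moq"

def Spec_normalizeCapitalization (key : String) (out : String) : Prop := out = normalizeCapitalization_alt key
instance (key : String) (out : String) : Decidable (Spec_normalizeCapitalization key out) := by unfold Spec_normalizeCapitalization; infer_instance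

-- ===== CLAIM (what is proved, stated in full; the proofs are below) =====
def Claim_equal_normalizeCapitalization : Prop := ∀ (key : String), Dom_normalizeCapitalization key → Pre_normalizeCapitalization key → Spec_normalizeCapitalization key (normalizeCapitalization key)

-- ===== LEMMAS AND PROOFS =====

-- the five (lowercased pattern, replacement) pairs, as plain char lists
def pBE : List Char := "basic/extended".toList
def rBE : List Char := "Basic/Extended".toList
def pMHz : List Char := "mhz".toList
def rMHz : List Char := "MHz".toList
def pGHz : List Char := "ghz".toList
def rGHz : List Char := "GHz".toList
def pHz : List Char := "hz".toList
def rHz : List Char := "Hz".toList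
def pMOQ : List Char := "moq".toList
def rMOQ : List Char := "MOQ".toList

-- str.replace old→new as a clean structural recursion (= PySem.Chars.replace for old ≠ [])
def pvRepl (pat rep : List Char) (l : List Char) : List Char :=
  match l with
  | [] => []
  | c :: t =>
    if pat <+: (c :: t) then rep ++ pvRepl pat rep (t.drop (pat.length - 1))
    else c :: pvRepl pat rep t
termination_by l.length
decreasing_by all_goals (simp only [List.length_cons, List.length_drop]; omega)

-- the composition of A's five replaces
def pvChain (l : List Char) : List Char :=
  pvRepl pMOQ rMOQ (pvRepl pHz rHz (pvRepl pGHz rGHz (pvRepl pMHz rMHz (pvRepl pBE rBE l))))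

-- u and v provably differ at some common position (so neither extends the other there)
def mismB (u v : List Char) : Bool :=
  (List.range (min u.length v.length)).any (fun j => u[j]? != v[j]?)
-- every nonempty suffix-after-drop of pre mismatches pat: pat cannot match starting inside pre
def passB (pat pre : List Char) : Bool :=
  (List.range pre.length).all (fun i => mismB pat (pre.drop i))
-- every nonempty drop of s mismatches both pat and rep
def okB (s pat rep : List Char) : Bool :=
  (List.range s.length).all (fun k => mismB (s.drop k) pat && mismB (s.drop k) rep)

lemma prefix_getElem? {u w : List Char} (h : u <+: w) {j : Nat} (hj : j < u.length) :
    w[j]? = u[j]? := by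
  obtain ⟨t, rfl⟩ := h
  exact List.getElem?_append_left hj

lemma not_prefix_append_of_mism {u v : List Char} (h : mismB u v = true) (z : List Char) :
    ¬ u <+: v ++ z := by
  intro hp
  simp only [mismB, List.any_eq_true, List.mem_range] at h
  obtain ⟨j, hj, hne⟩ := h
  have h1 : (v ++ z)[j]? = u[j]? := prefix_getElem? hp (by omega)
  have h2 : (v ++ z)[j]? = v[j]? := List.getElem?_append_left (by omega)
  simp only [bne_iff_ne] at hne
  exact hne (h1.symm.trans h2)

lemma not_both_prefix {u v y : List Char} (hu : u <+: y) (hv : v <+: y)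
    (h : mismB u v = true) : False := by
  simp only [mismB, List.any_eq_true, List.mem_range] at h
  obtain ⟨j, hj, hne⟩ := h
  have h1 : y[j]? = u[j]? := prefix_getElem? hu (by omega)
  have h2 : y[j]? = v[j]? := prefix_getElem? hv (by omega)
  simp only [bne_iff_ne] at hne
  exact hne (h1.symm.trans h2)

lemma pvRepl_nil (pat rep : List Char) : pvRepl pat rep [] = [] := by
  rw [pvRepl.eq_def]

lemma pvRepl_cons_pos {pat : List Char} (rep : List Char) {c : Char} {t : List Char}
    (h : pat <+: c :: t) :
    pvRepl pat rep (c :: t) = rep ++ pvRepl pat rep (t.drop (pat.length - 1)) := by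
  rw [pvRepl.eq_def]; simp [h]

lemma pvRepl_cons_neg {pat : List Char} (rep : List Char) {c : Char} {t : List Char}
    (h : ¬ pat <+: c :: t) :
    pvRepl pat rep (c :: t) = c :: pvRepl pat rep t := by
  rw [pvRepl.eq_def]; simp [h]

lemma pvRepl_prefix {pat : List Char} (rep : List Char) (hpat : pat ≠ []) (x : List Char) :
    pvRepl pat rep (pat ++ x) = rep ++ pvRepl pat rep x := by
  obtain ⟨p, pr, rfl⟩ : ∃ p pr, pat = p :: pr := by
    cases pat with
    | nil => exact absurd rfl hpat
    | cons p pr => exact ⟨p, pr, rfl⟩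
  rw [List.cons_append, pvRepl_cons_pos rep (List.prefix_append _ x)]
  rw [show (p :: pr).length - 1 = pr.length from by simp, List.drop_left]

lemma pvRepl_pass {pat : List Char} (rep : List Char) {pre : List Char}
    (h : passB pat pre = true) (x : List Char) :
    pvRepl pat rep (pre ++ x) = pre ++ pvRepl pat rep x := by
  induction pre with
  | nil => simp
  | cons c pre' ih =>
    simp only [passB, List.all_eq_true, List.mem_range] at h
    have h0 : mismB pat (c :: pre') = true := by simpa using h 0 (by simp)
    have hnp : ¬ pat <+: (c :: pre') ++ x := not_prefix_append_of_mism h0 x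
    rw [List.cons_append, pvRepl_cons_neg rep (by simpa using hnp)]
    rw [ih (by
      simp only [passB, List.all_eq_true, List.mem_range]
      intro i hi
      simpa using h (i + 1) (by simp; omega))]
    rfl

lemma prefix_pvRepl_iff {s pat rep : List Char}
    (hok : okB s pat rep = true) :
    ∀ (y : List Char) (k : Nat), (s.drop k <+: pvRepl pat rep y ↔ s.drop k <+: y) := by
  intro y
  generalize hn : y.length = n
  induction n using Nat.strong_induction_on generalizing y with
  | _ n IH =>
    intro k
    by_cases hk : s.length ≤ k
    · simp [List.drop_eq_nil_of_le hk]
    · rw [not_le] at hk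
      have hokk : mismB (s.drop k) pat = true ∧ mismB (s.drop k) rep = true := by
        simp only [okB, List.all_eq_true, List.mem_range, Bool.and_eq_true] at hok
        exact hok k hk
      cases y with
      | nil => simp [pvRepl_nil]
      | cons c t =>
        by_cases hp : pat <+: c :: t
        · rw [pvRepl_cons_pos rep hp]
          constructor
          · intro hcon
            exact absurd hcon (not_prefix_append_of_mism hokk.2 _)
          · intro hcon
            exact (not_both_prefix hcon hp hokk.1).elim
        · rw [pvRepl_cons_neg rep hp]
          have hIH := IH t.length (by rw [← hn, List.length_cons]; omega) t rfl (k + 1)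
          rw [List.drop_eq_getElem_cons hk, List.cons_prefix_cons, List.cons_prefix_cons]
          exact and_congr_right fun _ => hIH

lemma prefix_pvRepl_iff0 {s pat rep : List Char}
    (hok : okB s pat rep = true) (y : List Char) :
    s <+: pvRepl pat rep y ↔ s <+: y := by
  simpa using prefix_pvRepl_iff hok y 0

-- PySem.Chars.replace agrees with pvRepl for a nonempty pattern
lemma go_eq_pvRepl (old new : List Char) (hold : old ≠ []) :
    ∀ (fuel : Nat) (l acc : List Char), l.length ≤ fuel →
      PySem.Chars.replace.go old new fuel l acc = acc.reverse ++ pvRepl old new l := by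
  intro fuel
  induction fuel with
  | zero =>
    intro l acc hl
    have : l = [] := List.eq_nil_of_length_eq_zero (by omega)
    subst this
    rw [PySem.Chars.replace.go.eq_def]
    simp [pvRepl_nil]
  | succ fuel ih =>
    intro l acc hl
    cases l with
    | nil =>
      rw [PySem.Chars.replace.go.eq_def]
      simp [pvRepl_nil]
    | cons c t =>
      rw [PySem.Chars.replace.go.eq_def]
      simp only []
      by_cases hp : old <+: c :: t
      · have hB : old.isPrefixOf (c :: t) = true := by
          rw [List.isPrefixOf_iff_prefix]; exact hp
        rw [if_pos hB]
        have hlen : 1 ≤ old.length := by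
          cases old with
          | nil => exact absurd rfl hold
          | cons _ _ => simp
        have hdrop : (c :: t).drop old.length = t.drop (old.length - 1) := by
          obtain ⟨m, hm⟩ : ∃ m, old.length = m + 1 := ⟨old.length - 1, by omega⟩
          rw [hm]; simp
        have hl' : t.length + 1 ≤ fuel + 1 := by simpa using hl
        rw [ih ((c :: t).drop old.length) (new.reverse ++ acc)
            (by simp only [List.length_drop, List.length_cons]; omega)]
        rw [pvRepl_cons_pos new hp, hdrop]
        simp
      · have hB : old.isPrefixOf (c :: t) = false := by
          rw [Bool.eq_false_iff, ne_eq, List.isPrefixOf_iff_prefix]; exact hp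
        rw [if_neg (by simp [hB])]
        have hl' : t.length + 1 ≤ fuel + 1 := by simpa using hl
        rw [ih t (c :: acc) (by omega)]
        rw [pvRepl_cons_neg new hp]
        simp

lemma replace_eq_pvRepl (s old new : List Char) (hold : old ≠ []) :
    PySem.Chars.replace s old new = pvRepl old new s := by
  rw [PySem.Chars.replace]
  rw [if_neg (by simp [List.isEmpty_iff, hold])]
  simpa using go_eq_pvRepl old new hold s.length s [] le_rfl

-- chain-side case lemmas: how the five sequential replaces act on each kind of prefix
lemma chain_BE (t : List Char) : pvChain (pBE ++ t) = rBE ++ pvChain t := by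
  unfold pvChain
  rw [pvRepl_prefix rBE (by decide) t]
  rw [pvRepl_pass rMHz (pre := rBE) (by decide)]
  rw [pvRepl_pass rGHz (pre := rBE) (by decide)]
  rw [pvRepl_pass rHz (pre := rBE) (by decide)]
  rw [pvRepl_pass rMOQ (pre := rBE) (by decide)]

lemma chain_MHz (t : List Char) : pvChain (pMHz ++ t) = rMHz ++ pvChain t := by
  unfold pvChain
  rw [pvRepl_pass rBE (pre := pMHz) (by decide)]
  rw [pvRepl_prefix rMHz (by decide)]
  rw [pvRepl_pass rGHz (pre := rMHz) (by decide)]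
  rw [pvRepl_pass rHz (pre := rMHz) (by decide)]
  rw [pvRepl_pass rMOQ (pre := rMHz) (by decide)]

lemma chain_GHz (t : List Char) : pvChain (pGHz ++ t) = rGHz ++ pvChain t := by
  unfold pvChain
  rw [pvRepl_pass rBE (pre := pGHz) (by decide)]
  rw [pvRepl_pass rMHz (pre := pGHz) (by decide)]
  rw [pvRepl_prefix rGHz (by decide)]
  rw [pvRepl_pass rHz (pre := rGHz) (by decide)]
  rw [pvRepl_pass rMOQ (pre := rGHz) (by decide)]

lemma chain_Hz (t : List Char) : pvChain (pHz ++ t) = rHz ++ pvChain t := by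
  unfold pvChain
  rw [pvRepl_pass rBE (pre := pHz) (by decide)]
  rw [pvRepl_pass rMHz (pre := pHz) (by decide)]
  rw [pvRepl_pass rGHz (pre := pHz) (by decide)]
  rw [pvRepl_prefix rHz (by decide)]
  rw [pvRepl_pass rMOQ (pre := rHz) (by decide)]

lemma chain_MOQ (t : List Char) : pvChain (pMOQ ++ t) = rMOQ ++ pvChain t := by
  unfold pvChain
  rw [pvRepl_pass rBE (pre := pMOQ) (by decide)]
  rw [pvRepl_pass rMHz (pre := pMOQ) (by decide)]
  rw [pvRepl_pass rGHz (pre := pMOQ) (by decide)]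
  rw [pvRepl_pass rHz (pre := pMOQ) (by decide)]
  rw [pvRepl_prefix rMOQ (by decide)]

lemma chain_cons {c : Char} {t : List Char}
    (h1 : ¬ pBE <+: c :: t) (h2 : ¬ pMHz <+: c :: t) (h3 : ¬ pGHz <+: c :: t)
    (h4 : ¬ pHz <+: c :: t) (h5 : ¬ pMOQ <+: c :: t) :
    pvChain (c :: t) = c :: pvChain t := by
  unfold pvChain
  have e1 := pvRepl_cons_neg (pat := pBE) rBE h1
  have n2 : ¬ pMHz <+: pvRepl pBE rBE (c :: t) := by
    rw [prefix_pvRepl_iff0 (by decide)]; exact h2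
  rw [e1] at n2
  have n3 : ¬ pGHz <+: pvRepl pMHz rMHz (pvRepl pBE rBE (c :: t)) := by
    rw [prefix_pvRepl_iff0 (by decide),
        prefix_pvRepl_iff0 (by decide)]; exact h3
  rw [e1, pvRepl_cons_neg rMHz n2] at n3
  have n4 : ¬ pHz <+: pvRepl pGHz rGHz (pvRepl pMHz rMHz (pvRepl pBE rBE (c :: t))) := by
    rw [prefix_pvRepl_iff0 (by decide),
        prefix_pvRepl_iff0 (by decide),
        prefix_pvRepl_iff0 (by decide)]; exact h4
  rw [e1, pvRepl_cons_neg rMHz n2, pvRepl_cons_neg rGHz n3] at n4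
  have n5 : ¬ pMOQ <+: pvRepl pHz rHz (pvRepl pGHz rGHz (pvRepl pMHz rMHz (pvRepl pBE rBE (c :: t)))) := by
    rw [prefix_pvRepl_iff0 (by decide),
        prefix_pvRepl_iff0 (by decide),
        prefix_pvRepl_iff0 (by decide),
        prefix_pvRepl_iff0 (by decide)]; exact h5
  rw [e1, pvRepl_cons_neg rMHz n2, pvRepl_cons_neg rGHz n3, pvRepl_cons_neg rHz n4] at n5
  rw [e1, pvRepl_cons_neg rMHz n2, pvRepl_cons_neg rGHz n3, pvRepl_cons_neg rHz n4,
      pvRepl_cons_neg rMOQ n5]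

-- scan-side case lemmas
lemma scan_nil : pvScan [] = [] := by rw [pvScan.eq_def]

lemma scan_BE (t : List Char) :
    pvScan (pBE ++ t) = rBE ++ pvScan t := by
  simp only [pBE, rBE]
  have e : "basic/extended".toList ++ t = 'b' :: ("asic/extended".toList ++ t) := rfl
  rw [e]
  simp only [pvScan, if_pos (show "basic/extended".toList <+: 'b' :: ("asic/extended".toList ++ t) from e ▸ List.prefix_append "basic/extended".toList t)]
  rw [show List.drop 13 ("asic/extended".toList ++ t) = t from rfl]

lemma scan_MHz (t : List Char) (h1 : ¬ pBE <+: pMHz ++ t) :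
    pvScan (pMHz ++ t) = rMHz ++ pvScan t := by
  simp only [pBE, pMHz, rMHz] at h1 ⊢
  have e : "mhz".toList ++ t = 'm' :: ("hz".toList ++ t) := rfl
  rw [e] at h1 ⊢
  simp only [pvScan, if_pos (show "mhz".toList <+: 'm' :: ("hz".toList ++ t) from e ▸ List.prefix_append "mhz".toList t), if_neg h1]
  rw [show List.drop 2 ("hz".toList ++ t) = t from rfl]

lemma scan_GHz (t : List Char) (h1 : ¬ pBE <+: pGHz ++ t) (h2 : ¬ pMHz <+: pGHz ++ t) :
    pvScan (pGHz ++ t) = rGHz ++ pvScan t := by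
  simp only [pBE, pMHz, pGHz, rGHz] at h1 h2 ⊢
  have e : "ghz".toList ++ t = 'g' :: ("hz".toList ++ t) := rfl
  rw [e] at h1 h2 ⊢
  simp only [pvScan, if_pos (show "ghz".toList <+: 'g' :: ("hz".toList ++ t) from e ▸ List.prefix_append "ghz".toList t), if_neg h1, if_neg h2]
  rw [show List.drop 2 ("hz".toList ++ t) = t from rfl]

lemma scan_Hz (t : List Char) (h1 : ¬ pBE <+: pHz ++ t) (h2 : ¬ pMHz <+: pHz ++ t) (h3 : ¬ pGHz <+: pHz ++ t) :
    pvScan (pHz ++ t) = rHz ++ pvScan t := by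
  simp only [pBE, pMHz, pGHz, pHz, rHz] at h1 h2 h3 ⊢
  have e : "hz".toList ++ t = 'h' :: ("z".toList ++ t) := rfl
  rw [e] at h1 h2 h3 ⊢
  simp only [pvScan, if_pos (show "hz".toList <+: 'h' :: ("z".toList ++ t) from e ▸ List.prefix_append "hz".toList t), if_neg h1, if_neg h2, if_neg h3]
  rw [show List.drop 1 ("z".toList ++ t) = t from rfl]

lemma scan_MOQ (t : List Char) (h1 : ¬ pBE <+: pMOQ ++ t) (h2 : ¬ pMHz <+: pMOQ ++ t) (h3 : ¬ pGHz <+: pMOQ ++ t) (h4 : ¬ pHz <+: pMOQ ++ t) :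
    pvScan (pMOQ ++ t) = rMOQ ++ pvScan t := by
  simp only [pBE, pGHz, pHz, pMHz, pMOQ, rMOQ] at h1 h2 h3 h4 ⊢
  have e : "moq".toList ++ t = 'm' :: ("oq".toList ++ t) := rfl
  rw [e] at h1 h2 h3 h4 ⊢
  simp only [pvScan, if_pos (show "moq".toList <+: 'm' :: ("oq".toList ++ t) from e ▸ List.prefix_append "moq".toList t), if_neg h1, if_neg h2, if_neg h3, if_neg h4]
  rw [show List.drop 2 ("oq".toList ++ t) = t from rfl]

lemma scan_cons {c : Char} {t : List Char}
    (h1 : ¬ pBE <+: c :: t) (h2 : ¬ pMHz <+: c :: t) (h3 : ¬ pGHz <+: c :: t)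
    (h4 : ¬ pHz <+: c :: t) (h5 : ¬ pMOQ <+: c :: t) :
    pvScan (c :: t) = c :: pvScan t := by
  simp only [pBE, pMHz, pGHz, pHz, pMOQ] at h1 h2 h3 h4 h5
  simp only [pvScan, if_neg h1, if_neg h2, if_neg h3, if_neg h4, if_neg h5]

-- the heart of the proof: A's five sequential replaces equal B's single pass, on every list
lemma chain_eq_scan : ∀ (l : List Char), pvChain l = pvScan l := by
  intro l
  generalize hn : l.length = n
  induction n using Nat.strong_induction_on generalizing l with
  | _ n IH =>
    by_cases hBE : pBE <+: l
    · obtain ⟨t, rfl⟩ := hBE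
      rw [chain_BE, scan_BE,
        IH t.length (by rw [← hn, List.length_append, show pBE.length = 14 from rfl]; omega) t rfl]
    · by_cases hM : pMHz <+: l
      · obtain ⟨t, rfl⟩ := hM
        rw [chain_MHz, scan_MHz t hBE,
          IH t.length (by rw [← hn, List.length_append, show pMHz.length = 3 from rfl]; omega) t rfl]
      · by_cases hG : pGHz <+: l
        · obtain ⟨t, rfl⟩ := hG
          rw [chain_GHz, scan_GHz t hBE hM,
            IH t.length (by rw [← hn, List.length_append, show pGHz.length = 3 from rfl]; omega) t rfl]
        · by_cases hH : pHz <+: l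
          · obtain ⟨t, rfl⟩ := hH
            rw [chain_Hz, scan_Hz t hBE hM hG,
              IH t.length (by rw [← hn, List.length_append, show pHz.length = 2 from rfl]; omega) t rfl]
          · by_cases hQ : pMOQ <+: l
            · obtain ⟨t, rfl⟩ := hQ
              rw [chain_MOQ, scan_MOQ t hBE hM hG hH,
                IH t.length (by rw [← hn, List.length_append, show pMOQ.length = 3 from rfl]; omega) t rfl]
            · cases l with
              | nil => simp [pvChain, pvRepl_nil, scan_nil]
              | cons c t =>
                rw [chain_cons hBE hM hG hH hQ, scan_cons hBE hM hG hH hQ,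
                    IH t.length (by rw [← hn, List.length_cons]; omega) t rfl]

-- the lowered patterns of A's loop are the list literals
lemma lower_BE : PySem.Chars.lower "Basic/Extended".toList = pBE := by decide
lemma lower_MHz : PySem.Chars.lower "MHz".toList = pMHz := by decide
lemma lower_GHz : PySem.Chars.lower "GHz".toList = pGHz := by decide
lemma lower_Hz : PySem.Chars.lower "Hz".toList = pHz := by decide
lemma lower_MOQ : PySem.Chars.lower "MOQ".toList = pMOQ := by decide

-- A's folded replace loop IS pvChain
lemma foldA_eq_chain (k0 : List Char) :
    pvCaps.foldl (fun s capt => PySem.Chars.replace s (PySem.Chars.lower capt) capt) k0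
      = pvChain k0 := by
  simp only [pvCaps, List.foldl]
  rw [lower_BE, lower_MHz, lower_GHz, lower_Hz, lower_MOQ]
  rw [replace_eq_pvRepl _ _ _ (by decide), replace_eq_pvRepl _ _ _ (by decide),
      replace_eq_pvRepl _ _ _ (by decide), replace_eq_pvRepl _ _ _ (by decide),
      replace_eq_pvRepl _ _ _ (by decide)]
  rfl

-- ===== VERDICT (by name: the statement is the Claim_ definition above) =====
theorem normalizeCapitalization_spec : Claim_equal_normalizeCapitalization := by
  intro key _ _
  unfold Spec_normalizeCapitalization normalizeCapitalization normalizeCapitalization_alt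
  simp only [foldA_eq_chain, chain_eq_scan]
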